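-- pv_equiv track=rewrite | github.com/sonukumar32977/Mental_Health_tracker | models/risk_model.py | _keyword_override
-- ===== SOURCE A (Python) =====
-- CRISIS_KEYWORDS = [
--     "suicide", "kill myself", "end my life", "don't want to live",
--     "want to die", "self-harm", "hurt myself", "not worth living",
--     "can't go on", "no reason to live"
-- ]
--
-- DEPRESSION_KEYWORDS = [
--     "hopeless", "worthless", "empty", "no joy", "can't get up",
--     "no energy", "everything is pointless", "numb", "miserable",
--     "crying all the time", "no motivation"
-- ]
--
-- ANXIETY_KEYWORDS = [
--     "anxious", "panic", "worried", "can't stop thinking",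
--     "heart racing", "nervous", "overthinking", "dread", "scared", "fear"
-- ]
--
-- def _keyword_override(text: str) -> str | None:
--     """
--     Check for high-priority keywords that should override model prediction.
--
--     Args:
--         text (str): Lowercased journal entry text.
--
--     Returns:
--         str | None: Risk level string, or None if no keywords found.
--     """
--     text_lower = text.lower()
--     if any(kw in text_lower for kw in CRISIS_KEYWORDS):
--         return "high-risk"
--     if any(kw in text_lower for kw in DEPRESSION_KEYWORDS):
--         return "depression"
--     if any(kw in text_lower for kw in ANXIETY_KEYWORDS):
--         return "anxiety"
--     return None
-- ===== SOURCE B (Python) =====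
-- CRISIS_KEYWORDS = [
--     "suicide", "kill myself", "end my life", "don't want to live",
--     "want to die", "self-harm", "hurt myself", "not worth living",
--     "can't go on", "no reason to live"
-- ]
--
-- DEPRESSION_KEYWORDS = [
--     "hopeless", "worthless", "empty", "no joy", "can't get up",
--     "no energy", "everything is pointless", "numb", "miserable",
--     "crying all the time", "no motivation"
-- ]
--
-- ANXIETY_KEYWORDS = [
--     "anxious", "panic", "worried", "can't stop thinking",
--     "heart racing", "nervous", "overthinking", "dread", "scared", "fear"
-- ]
--
-- # One flat keyword -> level table and a priority rank per level.
-- _KEYWORD_LEVEL = (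
--     [(kw, "high-risk") for kw in CRISIS_KEYWORDS]
--     + [(kw, "depression") for kw in DEPRESSION_KEYWORDS]
--     + [(kw, "anxiety") for kw in ANXIETY_KEYWORDS]
-- )
-- _RANK = {"high-risk": 0, "depression": 1, "anxiety": 2}
--
--
-- def _keyword_override(text: str) -> str | None:
--     text_lower = text.lower()
--     best = None
--     for kw, level in _KEYWORD_LEVEL:
--         if kw in text_lower and (best is None or _RANK[level] < _RANK[best]):
--             best = level
--     return best
-- ===== Notes on version B (the rewrite author's own statement) =====
-- stated objective: alternative
-- what changed: Replaces the three sequential any()-short-circuit category scans with one flat keyword-to-level table traversed in a single pass that keeps the best (lowest-rank) matching level, using a rank dict to encode the crisis > depression > anxiety priority.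
import Mathlib
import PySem

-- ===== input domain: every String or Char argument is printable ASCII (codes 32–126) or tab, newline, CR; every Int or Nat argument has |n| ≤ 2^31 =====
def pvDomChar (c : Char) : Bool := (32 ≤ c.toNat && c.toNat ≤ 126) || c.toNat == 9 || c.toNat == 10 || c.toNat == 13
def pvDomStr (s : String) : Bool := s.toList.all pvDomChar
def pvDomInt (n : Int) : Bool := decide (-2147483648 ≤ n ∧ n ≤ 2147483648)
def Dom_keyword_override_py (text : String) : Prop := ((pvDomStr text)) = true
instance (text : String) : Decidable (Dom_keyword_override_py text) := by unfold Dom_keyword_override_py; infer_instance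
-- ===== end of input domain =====

-- B replaces A's three sequential any()-scans by one pass over a flat keyword→level
-- table that keeps the best-ranked matching level (objective: alternative decomposition).

-- ===== PORT A =====
def pvCrisisKw : List String :=
  ["suicide", "kill myself", "end my life", "don't want to live",
   "want to die", "self-harm", "hurt myself", "not worth living",
   "can't go on", "no reason to live"]

def pvDepressionKw : List String :=
  ["hopeless", "worthless", "empty", "no joy", "can't get up",
   "no energy", "everything is pointless", "numb", "miserable",
   "crying all the time", "no motivation"]

def pvAnxietyKw : List String :=
  ["anxious", "panic", "worried", "can't stop thinking",
   "heart racing", "nervous", "overthinking", "dread", "scared", "fear"]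

def keyword_override_py (text : String) : Option String :=
  let text_lower := PySem.Str.lower text
  if pvCrisisKw.any (fun kw => PySem.Str.isIn kw text_lower) then some "high-risk"
  else if pvDepressionKw.any (fun kw => PySem.Str.isIn kw text_lower) then some "depression"
  else if pvAnxietyKw.any (fun kw => PySem.Str.isIn kw text_lower) then some "anxiety"
  else none

-- ===== PORT B =====
-- _KEYWORD_LEVEL: the flat keyword → level table of Source B
def pvKwLevel : List (String × String) :=
  pvCrisisKw.map (fun kw => (kw, "high-risk"))
    ++ pvDepressionKw.map (fun kw => (kw, "depression"))
    ++ pvAnxietyKw.map (fun kw => (kw, "anxiety"))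

-- _RANK dict of Source B
def pvRank : PySem.Dict String Nat :=
  PySem.Dict.ofList [("high-risk", 0), ("depression", 1), ("anxiety", 2)]

-- _RANK[s]; exact here: every level looked up in Source B is a key of _RANK, so the
-- default 0 is never used.
def pvRankOf (s : String) : Nat := (pvRank.get? s).getD 0

-- one iteration of Source B's loop body
def pvStep (t : String) (best : Option String) (kl : String × String) : Option String :=
  if PySem.Str.isIn kl.1 t
      && (match best with
          | none => true
          | some b => decide (pvRankOf kl.2 < pvRankOf b))
  then some kl.2 else best

def keyword_override_py_alt (text : String) : Option String :=
  let text_lower := PySem.Str.lower text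
  pvKwLevel.foldl (pvStep text_lower) none

-- ===== PRECONDITION & SPEC =====
def Spec_keyword_override_py (text : String) (out : Option String) : Prop := out = keyword_override_py_alt text
instance (text : String) (out : Option String) : Decidable (Spec_keyword_override_py text out) := by unfold Spec_keyword_override_py; infer_instance

-- ===== CLAIM (what is proved, stated in full; the proofs are below) =====
def Claim_equal_keyword_override_py : Prop := ∀ (text : String), Dom_keyword_override_py text → Spec_keyword_override_py text (keyword_override_py text)

-- ===== LEMMAS AND PROOFS =====

-- effect of one loop iteration whose keyword matched
def pvUpd (best : Option String) (lvl : String) : Option String :=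
  if (match best with
      | none => true
      | some b => decide (pvRankOf lvl < pvRankOf b))
  then some lvl else best

lemma pvStep_eq (t : String) (b : Option String) (kw lvl : String) :
    pvStep t b (kw, lvl) = if PySem.Str.isIn kw t then pvUpd b lvl else b := by
  simp [pvStep, pvUpd]
  split_ifs <;> simp_all

lemma pvUpd_idem (b : Option String) (lvl : String) :
    pvUpd (pvUpd b lvl) lvl = pvUpd b lvl := by
  cases b with
  | none => simp [pvUpd]
  | some c =>
    simp only [pvUpd]
    split_ifs <;> simp_all

-- folding Source B's loop over one constant-level segment of the table
lemma pvFold_seg (t : String) (L : List String) (lvl : String) (b : Option String) :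
    (L.map (fun kw => (kw, lvl))).foldl (pvStep t) b
      = if L.any (fun kw => PySem.Str.isIn kw t) then pvUpd b lvl else b := by
  induction L generalizing b with
  | nil => simp
  | cons kw rest ih =>
    simp only [List.map_cons, List.foldl_cons, List.any_cons, pvStep_eq, ih]
    by_cases h : PySem.Str.isIn kw t = true <;>
      by_cases hr : rest.any (fun kw => PySem.Str.isIn kw t) = true <;>
        (try rw [Bool.not_eq_true] at h) <;> (try rw [Bool.not_eq_true] at hr) <;>
          simp only [h, hr] <;> simp [pvUpd_idem]

-- ===== VERDICT (by name: the statement is the Claim_ definition above) =====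
theorem keyword_override_py_spec : Claim_equal_keyword_override_py := by
  intro text _
  simp only [Spec_keyword_override_py, keyword_override_py, keyword_override_py_alt, pvKwLevel,
    List.foldl_append, pvFold_seg]
  by_cases hc : (pvCrisisKw.any fun kw => PySem.Str.isIn kw (PySem.Str.lower text)) = true <;>
    by_cases hd : (pvDepressionKw.any fun kw => PySem.Str.isIn kw (PySem.Str.lower text)) = true <;>
      by_cases ha : (pvAnxietyKw.any fun kw => PySem.Str.isIn kw (PySem.Str.lower text)) = true <;>
        (try rw [Bool.not_eq_true] at hc) <;> (try rw [Bool.not_eq_true] at hd) <;>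
          (try rw [Bool.not_eq_true] at ha) <;> simp only [hc, hd, ha] <;> decide
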